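-- pv_equiv track=rewrite | github.com/PCBZ/AlgorithmPractise | Amazon_oa/computational_same.py | computational_same
-- ===== SOURCE A (Python) =====
-- from typing import List
--
-- def computational_same(processes: List[int], m: int) -> int:
--     processes.sort()
--     n = len(processes)
--     count = 0
--     left, right = 0, 0
--     for left in range(n):
--         while right < n and processes[right] - processes[left] <= m:
--             right += 1
--         count += right - 1 - left
--         left += 1
--         right = left
--     return count
-- ===== SOURCE B (Python) =====
-- from typing import List
-- from bisect import bisect_right
--
-- def computational_same(processes: List[int], m: int) -> int:
--     # sorts in place like the original; per element, bisect replaces the inner scan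
--     processes.sort()
--     total = 0
--     for i, p in enumerate(processes):
--         total += bisect_right(processes, p + m, i) - i - 1
--     return total
-- ===== Notes on version B (the rewrite author's own statement) =====
-- stated objective: faster
-- what changed: After sorting, the inner linear while-scan per element is replaced by a single bisect_right binary search per element (no carried right pointer).
import Mathlib
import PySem

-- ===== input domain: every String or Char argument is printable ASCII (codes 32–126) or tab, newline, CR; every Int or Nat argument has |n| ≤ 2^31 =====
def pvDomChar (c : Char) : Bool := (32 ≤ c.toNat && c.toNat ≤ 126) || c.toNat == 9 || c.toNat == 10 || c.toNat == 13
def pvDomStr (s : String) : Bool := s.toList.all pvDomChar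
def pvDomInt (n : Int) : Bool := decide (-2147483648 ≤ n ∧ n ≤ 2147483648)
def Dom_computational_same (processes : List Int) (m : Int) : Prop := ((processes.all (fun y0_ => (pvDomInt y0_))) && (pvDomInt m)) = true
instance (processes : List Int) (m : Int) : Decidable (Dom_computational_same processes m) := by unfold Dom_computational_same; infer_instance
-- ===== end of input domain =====

-- B replaces A's per-element inner while-scan by one bisect_right per element (same return value;
-- like A, the Python B sorts `processes` in place — the equivalence proved here is about the return value).

-- ===== PORT A =====
-- the inner `while right < n and processes[right] - processes[left] <= m: right += 1`
def pvAwhile (ps : List Int) (m pl : Int) (right : Nat) : Nat :=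
  if h : right < ps.length ∧ ps.getD right 0 - pl ≤ m then pvAwhile ps m pl (right + 1)
  else right
termination_by ps.length - right
decreasing_by omega

-- one iteration of `for left in range(n)` over the state (count, right)
def pvAstep (ps : List Int) (m : Int) (st : Int × Nat) (left : Nat) : Int × Nat :=
  let right := pvAwhile ps m (ps.getD left 0) st.2
  (st.1 + ((right : Int) - 1 - (left : Int)), left + 1)

def computational_same (processes : List Int) (m : Int) : Int :=
  let ps := PySem.List.sorted processes (fun x => x)
  ((List.range ps.length).foldl (pvAstep ps m) (0, 0)).1

-- ===== PORT B =====
-- hand port of bisect.bisect_right(ps, x, lo); exact on the sorted lists it is applied to here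
def pvBisectRight (ps : List Int) (x : Int) (lo : Nat) : Nat :=
  lo + ((ps.drop lo).takeWhile (fun v => decide (v ≤ x))).length

def computational_same_alt (processes : List Int) (m : Int) : Int :=
  let ps := PySem.List.sorted processes (fun x => x)
  (PySem.List.enumerate ps).foldl
    (fun total ip => total + ((pvBisectRight ps (ip.2 + m) ip.1.toNat : Int) - ip.1 - 1)) 0

-- ===== PRECONDITION & SPEC =====
def Spec_computational_same (processes : List Int) (m : Int) (out : Int) : Prop := out = computational_same_alt processes m
instance (processes : List Int) (m : Int) (out : Int) : Decidable (Spec_computational_same processes m out) := by unfold Spec_computational_same; infer_instance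

-- ===== CLAIM (what is proved, stated in full; the proofs are below) =====
def Claim_equal_computational_same : Prop := ∀ (processes : List Int) (m : Int), Dom_computational_same processes m → Spec_computational_same processes m (computational_same processes m)

-- ===== LEMMAS AND PROOFS =====

-- characterisation of A's while loop: it advances past exactly the prefix of drop r satisfying the test
theorem pvAwhile_eq (ps : List Int) (m pl : Int) (r : Nat) :
    pvAwhile ps m pl r = r + ((ps.drop r).takeWhile (fun v => decide (v - pl ≤ m))).length := by
  fun_induction pvAwhile ps m pl r with
  | case1 r h ih =>
      obtain ⟨hr, hc⟩ := h
      rw [ih, List.drop_eq_getElem_cons hr, List.takeWhile_cons]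
      have : ps.getD r 0 = ps[r] := List.getD_eq_getElem ps 0 hr
      simp only [this ▸ hc, decide_true]
      simp
      omega
  | case2 r h =>
      by_cases hr : r < ps.length
      · have hc : ¬ ps.getD r 0 - pl ≤ m := fun hc => h ⟨hr, hc⟩
        rw [List.drop_eq_getElem_cons hr, List.takeWhile_cons]
        have : ps.getD r 0 = ps[r] := List.getD_eq_getElem ps 0 hr
        simp [this ▸ hc]
      · rw [List.drop_eq_nil_of_le (by omega)]
        simp

-- A's advanced pointer equals B's bisect on the same list
theorem pvAwhile_eq_bisect (ps : List Int) (m pl : Int) (r : Nat) :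
    pvAwhile ps m pl r = pvBisectRight ps (pl + m) r := by
  rw [pvAwhile_eq, pvBisectRight]
  have h : (fun v : Int => decide (v - pl ≤ m)) = fun v => decide (v ≤ pl + m) := by
    funext v; simp [decide_eq_decide]; omega
  rw [h]

-- A's fold over range n keeps the invariant snd = next left, and its count is a plain sum
theorem foldA (ps : List Int) (m : Int) (k : Nat) :
    (List.range k).foldl (pvAstep ps m) (0, 0)
      = ((List.range k).foldl
          (fun t i => t + ((pvBisectRight ps (ps.getD i 0 + m) i : Int) - 1 - (i : Int))) 0, k) := by
  induction k with
  | zero => simp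
  | succ k ih =>
      rw [List.range_succ, List.foldl_append, List.foldl_append, ih]
      simp [pvAstep, pvAwhile_eq_bisect]

theorem computational_same_spec : Claim_equal_computational_same := by
  intro processes m _
  simp only [Spec_computational_same, computational_same, computational_same_alt]
  generalize PySem.List.sorted processes (fun x => x) = ps
  rw [PySem.List.enumerate_eq_map_pyRange ps 0, PySem.List.pyRange_one, foldA]
  simp only [List.foldl_map]
  have hlen : (PySem.List.len ps - 0).toNat = ps.length := by
    simp [PySem.List.len]
  rw [hlen]
  congr 1
  funext t i
  simp [PySem.List.pyGetD_natCast]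
  ring
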